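-- pv_equiv track=rewrite | github.com/eth-cscs/production | spack/reframe/src/spack_util/spacklib.py | generate_spec_with_proper_compilers
-- ===== SOURCE A (Python) =====
-- def get_substring_pos_or_lastpos(string, substring, start=None, end=None):
--     if start and end:
--         cur = string.find(substring, start, end)
--     elif start:
--         cur = string.find(substring, start)
--     elif end:
--         cur = string.find(substring, 0, end)
--     else:
--         cur = string.find(substring)
--
--     if cur != -1:
--         return cur
--     else:
--         return len(string)-1
--
-- def get_compiler_from_spec(spec):
--     ret = ''
--     if '%' in spec:
--         spec += ' '
--         end = len(spec)-1
--         startp = get_substring_pos_or_lastpos(spec, '%')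
--         if startp == end:
--             return ''
--         else:
--             startp += 1
--             oldcur = get_substring_pos_or_lastpos(spec, ' ', startp)
--             cur = get_substring_pos_or_lastpos(spec, '-', startp, oldcur)
--             oldcur = min(cur, oldcur)
--             cur = get_substring_pos_or_lastpos(spec, '~', startp, oldcur)
--             oldcur = min(cur, oldcur)
--             cur = get_substring_pos_or_lastpos(spec, '+', startp, oldcur)
--             oldcur = min(cur, oldcur)
--             ret = spec[startp:oldcur]
--     return ret
--
-- def generate_spec_with_proper_compilers(spec_list, allowed_compilers):
--     ret = set()
--     for spec in spec_list:
--         spec_compiler = get_compiler_from_spec(spec)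
--         if spec_compiler:
--             compilers = [c for c in allowed_compilers if spec_compiler in c]
--             for compiler in compilers:
--                 newspec = spec.replace('%' + spec_compiler, '%' + compiler)
--                 ret.add(newspec)
--         else:
--             for compiler in allowed_compilers:
--                 ret.add(f'{spec} %{compiler}')
--
--     return ret
-- ===== SOURCE B (Python) =====
-- def _compiler_of(spec):
--     """Compiler name = text after the first '%', cut at the first delimiter."""
--     _, sep, tail = spec.partition('%')
--     if not sep:
--         return ''
--     n = len(tail)
--     i = 0
--     while i < n and tail[i] not in ' -~+':
--         i += 1
--     return tail[:i]
--
--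
-- def generate_spec_with_proper_compilers(spec_list, allowed_compilers):
--     ret = set()
--     for spec in spec_list:
--         comp = _compiler_of(spec)
--         if comp:
--             ret.update(spec.replace('%' + comp, '%' + c)
--                        for c in allowed_compilers if comp in c)
--         else:
--             ret.update(f'{spec} %{c}' for c in allowed_compilers)
--     return ret
-- ===== Notes on version B (the rewrite author's own statement) =====
-- stated objective: idiomatic
-- what changed: The sentinel helper get_substring_pos_or_lastpos and its cascade of bounded find/min calls are replaced by a single partition-at-'%' plus one left-to-right scan that stops at the first delimiter, and the inner add-loops become set.update over a generator.
import Mathlib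
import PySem

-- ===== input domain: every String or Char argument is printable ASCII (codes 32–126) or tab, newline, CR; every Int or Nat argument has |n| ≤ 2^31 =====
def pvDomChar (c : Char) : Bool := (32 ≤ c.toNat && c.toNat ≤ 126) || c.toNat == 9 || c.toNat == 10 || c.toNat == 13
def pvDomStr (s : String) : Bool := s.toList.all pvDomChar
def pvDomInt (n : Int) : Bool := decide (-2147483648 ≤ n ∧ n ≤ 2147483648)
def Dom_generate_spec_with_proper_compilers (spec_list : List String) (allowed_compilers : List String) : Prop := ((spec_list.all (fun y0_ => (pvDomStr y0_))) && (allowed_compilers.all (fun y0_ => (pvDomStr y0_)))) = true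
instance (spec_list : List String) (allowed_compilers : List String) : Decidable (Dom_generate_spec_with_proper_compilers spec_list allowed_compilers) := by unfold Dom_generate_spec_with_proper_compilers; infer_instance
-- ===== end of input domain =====

-- B replaces A's sentinel helper and find/min cascade with a partition-at-'%' plus a single
-- scan to the first delimiter (and set.update over a generator); same return value, similar cost.
-- ===== PORT A =====
def pvTruthy (o : Option Int) : Bool := match o with | none => false | some n => n != 0

-- if start and end / elif start / elif end / else, then the -1 -> len(string)-1 sentinel
def get_substring_pos_or_lastpos (s sub : List Char) (start end_ : Option Int) : Int :=
  let cur :=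
    if pvTruthy start && pvTruthy end_ then PySem.Chars.findFrom s sub (start.getD 0) end_
    else if pvTruthy start then PySem.Chars.findFrom s sub (start.getD 0) none
    else if pvTruthy end_ then PySem.Chars.findFrom s sub 0 end_
    else PySem.Chars.find s sub
  if cur != -1 then cur else (s.length : Int) - 1

def get_compiler_from_spec (spec : List Char) : List Char :=
  if PySem.Chars.isIn ['%'] spec then
    let spec := spec ++ [' ']
    let end_ : Int := (spec.length : Int) - 1
    let startp := get_substring_pos_or_lastpos spec ['%'] none none
    if startp == end_ then []
    else
      let startp := startp + 1
      let oldcur := get_substring_pos_or_lastpos spec [' '] (some startp) none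
      let cur := get_substring_pos_or_lastpos spec ['-'] (some startp) (some oldcur)
      let oldcur := min cur oldcur
      let cur := get_substring_pos_or_lastpos spec ['~'] (some startp) (some oldcur)
      let oldcur := min cur oldcur
      let cur := get_substring_pos_or_lastpos spec ['+'] (some startp) (some oldcur)
      let oldcur := min cur oldcur
      PySem.Chars.slice spec (some startp) (some oldcur)
  else []

def generate_spec_with_proper_compilers (spec_list : List String) (allowed_compilers : List String) : List String :=
  spec_list.foldl (fun ret spec =>
    let spec_compiler := get_compiler_from_spec spec.toList
    if spec_compiler ≠ [] then
      let compilers := allowed_compilers.filter (fun c => PySem.Chars.isIn spec_compiler c.toList)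
      compilers.foldl (fun ret compiler =>
        PySem.Set.add ret (String.ofList (PySem.Chars.replace spec.toList ('%' :: spec_compiler) ('%' :: compiler.toList)))) ret
    else
      allowed_compilers.foldl (fun ret compiler =>
        PySem.Set.add ret (String.ofList (spec.toList ++ ' ' :: '%' :: compiler.toList))) ret)
    PySem.Set.empty

-- ===== PORT B =====
-- spec.partition('%') then one scan that stops at the first delimiter
def pvCompilerOf (spec : List Char) : List Char :=
  match spec.dropWhile (fun c => c != '%') with
  | [] => []
  | _ :: tail => tail.takeWhile (fun c => !(c == ' ' || c == '-' || c == '~' || c == '+'))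

def generate_spec_with_proper_compilers_alt (spec_list : List String) (allowed_compilers : List String) : List String :=
  spec_list.foldl (fun ret spec =>
    let comp := pvCompilerOf spec.toList
    if comp ≠ [] then
      PySem.Set.update ret ((allowed_compilers.filter (fun c => PySem.Chars.isIn comp c.toList)).map
        (fun c => String.ofList (PySem.Chars.replace spec.toList ('%' :: comp) ('%' :: c.toList))))
    else
      PySem.Set.update ret (allowed_compilers.map (fun c => String.ofList (spec.toList ++ ' ' :: '%' :: c.toList))))
    PySem.Set.empty

-- ===== PRECONDITION & SPEC =====
def Spec_generate_spec_with_proper_compilers (spec_list : List String) (allowed_compilers : List String) (out : List String) : Prop := out = generate_spec_with_proper_compilers_alt spec_list allowed_compilers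
instance (spec_list : List String) (allowed_compilers : List String) (out : List String) : Decidable (Spec_generate_spec_with_proper_compilers spec_list allowed_compilers out) := by unfold Spec_generate_spec_with_proper_compilers; infer_instance

-- ===== CLAIM (what is proved, stated in full; the proofs are below) =====
def Claim_equal_generate_spec_with_proper_compilers : Prop := ∀ (spec_list : List String) (allowed_compilers : List String), Dom_generate_spec_with_proper_compilers spec_list allowed_compilers → Spec_generate_spec_with_proper_compilers spec_list allowed_compilers (generate_spec_with_proper_compilers spec_list allowed_compilers)

-- ===== LEMMAS AND PROOFS =====

-- ===== LEMMAS AND PROOFS =====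

theorem pv_find_single (u : List Char) (c : Char) :
    PySem.Chars.find u [c] = if c ∈ u then ((u.findIdx (· == c) : ℕ) : ℤ) else -1 := by
  by_cases h : c ∈ u
  · have h0 : 0 ≤ PySem.Chars.find u [c] :=
      (PySem.Chars.find_nonneg_iff u [c]).2 ((List.singleton_infix_iff c u).2 h)
    obtain ⟨hpre, hmin⟩ := PySem.Chars.find_spec h0
    obtain ⟨l', hl', -⟩ := List.cons_prefix_iff.1 hpre
    have hget : u[(PySem.Chars.find u [c]).toNat]? = some c := by
      have h1 : (u.drop (PySem.Chars.find u [c]).toNat)[0]? = some c := by rw [hl']; rfl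
      rw [List.getElem?_drop] at h1; simpa using h1
    obtain ⟨hnlt, hval⟩ := List.getElem?_eq_some_iff.1 hget
    have hidx : u.findIdx (· == c) = (PySem.Chars.find u [c]).toNat := by
      rw [List.findIdx_eq hnlt]
      refine ⟨by simp [hval], fun j hj => ?_⟩
      have hnp := hmin j hj
      by_contra hp
      apply hnp
      have hj' : j < u.length := lt_trans hj hnlt
      rw [List.cons_prefix_iff]
      refine ⟨u.drop (j+1), ?_, List.nil_prefix⟩
      rw [List.drop_eq_getElem_cons hj']
      have : u[j] = c := by simpa using hp
      rw [this]
    rw [if_pos h, hidx]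
    omega
  · rw [if_neg h]
    exact (PySem.Chars.find_eq_neg_one_iff u [c]).2 (fun hin => h ((List.singleton_infix_iff c u).1 hin))

theorem pv_findFrom_window (s : List Char) (c : Char) (st e : ℕ) (hse : st ≤ e) (he : e ≤ s.length) :
    PySem.Chars.findFrom s [c] (st : ℤ) (some (e : ℤ)) =
      if c ∈ (s.take e).drop st then (((st + ((s.take e).drop st).findIdx (· == c) : ℕ)) : ℤ) else -1 := by
  have h1 : ¬ ((s.length : ℤ) < (e : ℤ)) := by omega
  have h2 : ¬ ((e : ℤ) < 0) := by omega
  have h3 : ¬ ((st : ℤ) < 0) := by omega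
  have h4 : ¬ ((e : ℤ) < (st : ℤ)) := by omega
  simp only [PySem.Chars.findFrom, h1, h2, h3, h4, if_false, Int.toNat_natCast, pv_find_single]
  by_cases hmem : c ∈ (s.take e).drop st
  · simp only [if_pos hmem]
    have : (0:ℤ) ≤ ((((s.take e).drop st).findIdx (· == c) : ℕ) : ℤ) := Int.natCast_nonneg _
    split
    · omega
    · push_cast; ring
  · simp [hmem]

theorem pv_findFrom_none (s : List Char) (c : Char) (st : ℕ) (hst : st ≤ s.length) :
    PySem.Chars.findFrom s [c] (st : ℤ) none =
      if c ∈ s.drop st then (((st + (s.drop st).findIdx (· == c) : ℕ)) : ℤ) else -1 := by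
  have h3 : ¬ ((st : ℤ) < 0) := by omega
  have h4 : ¬ ((s.length : ℤ) < (st : ℤ)) := by omega
  simp only [PySem.Chars.findFrom, h3, h4, if_false, Int.toNat_natCast, List.take_length,
    pv_find_single]
  by_cases hmem : c ∈ s.drop st
  · simp only [if_pos hmem]
    have : (0:ℤ) ≤ (((s.drop st).findIdx (· == c) : ℕ) : ℤ) := Int.natCast_nonneg _
    split
    · omega
    · push_cast; ring
  · simp [hmem]

theorem pv_findIdx_take_findIdx (l : List Char) (p q : Char → Bool) :
    (l.take (l.findIdx p)).findIdx q = l.findIdx (fun x => p x || q x) := by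
  induction l with
  | nil => simp
  | cons x xs ih =>
    by_cases hp : p x
    · simp [List.findIdx_cons, hp]
    · by_cases hq : q x
      · simp [List.findIdx_cons, hp, hq]
      · simp [List.findIdx_cons, hp, hq, ih]

-- the window (u++t)[u.length : u.length+m] is t.take m
theorem pv_window (u t : List Char) (m : ℕ) :
    ((u ++ t).take (u.length + m)).drop u.length = t.take m := by
  have h1 : List.take (u.length + m) u = u := List.take_of_length_le (by omega)
  rw [List.take_append, h1]
  simp

-- gsp with a start bound only, target character present
theorem pv_gsp_start (u t : List Char) (c : Char) (hu : u ≠ []) (hmem : c ∈ t) :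
    get_substring_pos_or_lastpos (u ++ t) [c] (some (u.length : ℤ)) none
      = (((u.length + t.findIdx (· == c) : ℕ)) : ℤ) := by
  have hst : u.length ≤ (u ++ t).length := by simp
  have h1 : ((u.length : ℤ)) ≠ 0 := by simpa using hu
  have h2 : ((((u.length + t.findIdx (· == c) : ℕ)) : ℤ)) ≠ -1 := by omega
  simp only [get_substring_pos_or_lastpos, pvTruthy, Bool.and_false, Option.getD_some,
    pv_findFrom_none (u ++ t) c u.length hst, List.drop_left, if_pos hmem]
  simp
  rw [if_neg hu]
  rw [if_neg (show ((u.length : ℤ) + ((t.findIdx (· == c) : ℕ) : ℤ)) ≠ -1 by omega)]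
theorem pv_gsp_step (u t : List Char) (c : Char) (m : ℕ) (hu : u ≠ []) (hm : m < t.length) :
    min (get_substring_pos_or_lastpos (u ++ t) [c] (some (u.length : ℤ)) (some ((u.length + m : ℕ) : ℤ)))
        (((u.length + m : ℕ)) : ℤ)
      = (((u.length + (t.take m).findIdx (· == c) : ℕ)) : ℤ) := by
  have hlen : u.length ≠ 0 := by simpa using hu
  have hse : u.length ≤ u.length + m := by omega
  have he : u.length + m ≤ (u ++ t).length := by simp only [List.length_append]; omega
  have h1 : ((u.length : ℤ)) ≠ 0 := by omega
  have h2 : ((((u.length + m : ℕ)) : ℤ)) ≠ 0 := by omega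
  have hwin := pv_findFrom_window (u ++ t) c u.length (u.length + m) hse he
  rw [pv_window] at hwin
  simp only [get_substring_pos_or_lastpos, pvTruthy, Option.getD_some, hwin]
  have hb : ((((u.length : ℤ)) != 0 && (((u.length + m : ℕ) : ℤ)) != 0)) = true := by
    rw [Bool.and_eq_true, bne_iff_ne, bne_iff_ne]; exact ⟨h1, h2⟩
  by_cases hmem : c ∈ t.take m
  · have h4 : (t.take m).findIdx (· == c) < (t.take m).length :=
      List.findIdx_lt_length.2 ⟨c, hmem, by simp⟩
    have hidx : (t.take m).findIdx (· == c) < m := by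
      simpa [List.length_take, Nat.min_eq_left (Nat.le_of_lt hm)] using h4
    have h3 : ((((u.length + (t.take m).findIdx (· == c) : ℕ)) : ℤ)) ≠ -1 := by omega
    rw [if_pos hb, if_pos hmem, if_pos (bne_iff_ne.mpr h3)]
    omega
  · have hidx : (t.take m).findIdx (· == c) = m := by
      have hall : (t.take m).findIdx (· == c) = (t.take m).length :=
        List.findIdx_eq_length.2 (fun x hx => by
          by_contra hxc
          exact hmem (by simpa [show x = c by simpa using hxc] using hx))
      simpa [List.length_take, Nat.min_eq_left (Nat.le_of_lt hm)] using hall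
    rw [if_pos hb, if_neg hmem, if_neg (by decide : ¬ (((-1 : ℤ) != -1) = true))]
    rw [hidx]
    simp only [List.length_append]
    omega

theorem pv_gsp_pct (a r : List Char) (hna : '%' ∉ a) :
    get_substring_pos_or_lastpos ((a ++ ['%']) ++ r) ['%'] none none = (a.length : ℤ) := by
  have hsp : (a ++ ['%']) ++ r = a ++ '%' :: r := by simp
  have hmem : '%' ∈ a ++ '%' :: r := by simp
  have hidx : (a ++ '%' :: r).findIdx (· == '%') = a.length := by
    have hA : a.findIdx (· == '%') = a.length :=
      List.findIdx_eq_length.2 (fun x hx => by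
        by_contra hxc
        exact hna (by simpa [show x = '%' by simpa using hxc] using hx))
    rw [List.findIdx_append, hA]
    simp [List.findIdx_cons]
  simp only [get_substring_pos_or_lastpos, pvTruthy, Bool.and_self, hsp,
    pv_find_single, if_pos hmem, hidx]
  norm_num
  intro hc
  omega

theorem pv_slice_window (u t : List Char) (m : ℕ) (hm : m ≤ t.length) :
    PySem.List.slice (u ++ t) (some (u.length : ℤ)) (some ((u.length + m : ℕ) : ℤ)) = t.take m := by
  have h1 : ¬ ((u.length : ℤ) < 0) := by omega
  have h2 : ¬ (((u.length + m : ℕ) : ℤ) < 0) := by omega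
  simp only [PySem.List.slice, PySem.List.clampIdx, h1, h2, if_false, Int.toNat_natCast,
    List.length_append]
  have h3 : min u.length (u.length + t.length) = u.length := by omega
  have h4 : min (u.length + m) (u.length + t.length) = u.length + m := by omega
  rw [h3, h4]
  have h5 : u.length + m - u.length = m := by omega
  rw [h5, List.drop_left]

theorem pv_m_bound (t : List Char) (m : ℕ) (c : Char) (hm : m < t.length) :
    (t.take m).findIdx (· == c) < t.length := by
  have h4 := List.findIdx_le_length (p := (· == c)) (xs := t.take m)
  rw [List.length_take] at h4
  have h5 := min_le_left m t.length
  omega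

theorem pv_compiler_eq (spec : List Char) :
    get_compiler_from_spec spec = pvCompilerOf spec := by
  by_cases h : '%' ∈ spec
  · have hd' : spec.dropWhile (fun c => c != '%') ≠ [] := by
      intro hnil
      have h2 := List.dropWhile_eq_nil_iff.1 hnil '%' h
      simp at h2
    obtain ⟨x, b', hxb⟩ := List.exists_cons_of_ne_nil hd'
    have hx : x = '%' := by
      have hf := List.head_dropWhile_not (fun c => c != '%') hd'
      have h5 : (spec.dropWhile (fun c => c != '%')).head hd' = x := by simp [hxb]
      rw [h5] at hf
      simpa using hf
    subst hx
    have hna : '%' ∉ spec.takeWhile (fun c => c != '%') := fun hmem => by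
      have h3 := List.mem_takeWhile_imp hmem
      simp at h3
    have hsplit : spec = spec.takeWhile (fun c => c != '%') ++ '%' :: b' := by
      conv_lhs => rw [← List.takeWhile_append_dropWhile (p := fun c => c != '%') (l := spec)]
      rw [hxb]
    obtain ⟨a, ha⟩ : ∃ a, spec.takeWhile (fun c => c != '%') = a := ⟨_, rfl⟩
    rw [ha] at hna hsplit
    rw [hsplit] at hxb ⊢
    -- B side
    have hdrop : (a ++ '%' :: b').dropWhile (fun c => c != '%') = '%' :: b' := hxb
    have hB : pvCompilerOf (a ++ '%' :: b')
        = b'.takeWhile (fun c => !(c == ' ' || c == '-' || c == '~' || c == '+')) := by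
      simp only [pvCompilerOf, hdrop]
    rw [hB]
    -- A side
    have hisin : PySem.Chars.isIn ['%'] (a ++ '%' :: b') = true :=
      (PySem.Chars.isIn_iff_infix _ _).2 ((List.singleton_infix_iff _ _).2 (by simp))
    have happ : (a ++ '%' :: b') ++ [' '] = (a ++ ['%']) ++ (b' ++ [' ']) := by simp
    have hu : a ++ ['%'] ≠ [] := by simp
    have hcast : ((a.length : ℤ)) + 1 = ((a ++ ['%']).length : ℤ) := by simp
    have hmem1 : ' ' ∈ b' ++ [' '] := by simp
    have hm1 : (b' ++ [' ']).findIdx (· == ' ') < (b' ++ [' ']).length :=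
      List.findIdx_lt_length.2 ⟨' ', hmem1, by simp⟩
    simp only [get_compiler_from_spec, if_pos hisin, happ]
    rw [pv_gsp_pct a (b' ++ [' ']) hna]
    have hne1 : ((((a.length : ℤ))) == (((a ++ ['%']) ++ (b' ++ [' '])).length : ℤ) - 1) = false := by
      simp only [beq_eq_false_iff_ne, ne_eq, List.length_append, List.length_cons]
      push_cast
      omega
    rw [hne1]
    simp only [Bool.false_eq_true, if_false]
    rw [hcast]
    rw [pv_gsp_start (a ++ ['%']) (b' ++ [' ']) ' ' hu hmem1]
    have hm2 := pv_m_bound (b' ++ [' ']) _ '-' hm1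
    have hm3 := pv_m_bound (b' ++ [' ']) _ '~' hm2
    have hm4 := (pv_m_bound (b' ++ [' ']) _ '+' hm3).le
    rw [pv_gsp_step (a ++ ['%']) (b' ++ [' ']) '-' _ hu hm1]
    rw [pv_gsp_step (a ++ ['%']) (b' ++ [' ']) '~' _ hu hm2]
    rw [pv_gsp_step (a ++ ['%']) (b' ++ [' ']) '+' _ hu hm3]
    rw [PySem.Chars.slice_eq_listSlice, pv_slice_window _ _ _ hm4]
    simp only [pv_findIdx_take_findIdx]
    have hswap : List.takeWhile (fun c => !(c == ' ' || c == '-' || c == '~' || c == '+')) b'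
        = List.takeWhile (fun c => !(c == ' ' || c == '-' || c == '~' || c == '+')) (b' ++ [' ']) := by
      rw [List.takeWhile_append]
      split
      case isTrue hlen =>
        have hb' := (@List.takeWhile_prefix _ b' (fun c => !(c == ' ' || c == '-' || c == '~' || c == '+'))).eq_of_length hlen
        have hsp2 : List.takeWhile (fun c => !(c == ' ' || c == '-' || c == '~' || c == '+')) [' '] = ([] : List Char) := by decide
        rw [hb', hsp2, List.append_nil]
      case isFalse hlen => rfl
    rw [hswap, List.takeWhile_eq_take_findIdx_not]
    simp only [Bool.not_not]
  · have hA : PySem.Chars.isIn ['%'] spec = false :=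
      (PySem.Chars.isIn_eq_false_iff _ _).2 (fun hin => h ((List.singleton_infix_iff _ _).1 hin))
    have hB : spec.dropWhile (fun c => c != '%') = [] :=
      List.dropWhile_eq_nil_iff.2 (fun x hx => by
        simp only [bne_iff_ne, ne_eq]
        intro hxc
        exact h (hxc ▸ hx))
    simp [get_compiler_from_spec, pvCompilerOf, hA, hB]

-- ===== VERDICT (by name: the statement is the Claim_ definition above) =====
theorem generate_spec_with_proper_compilers_spec : Claim_equal_generate_spec_with_proper_compilers := by
  intro spec_list allowed_compilers _
  unfold Spec_generate_spec_with_proper_compilers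
  unfold generate_spec_with_proper_compilers generate_spec_with_proper_compilers_alt
  congr 1
  funext ret spec
  rw [pv_compiler_eq]
  by_cases h : pvCompilerOf spec.toList ≠ []
  · simp only [if_pos h, PySem.Set.update, List.foldl_map]
  · simp only [if_neg h, PySem.Set.update, List.foldl_map]
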